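-- pv_equiv track=rewrite | github.com/KalilouSySav/gaia_ultimatum | gaia_ultimatum/utils.py | calculate_button_positions
-- ===== SOURCE A (Python) =====
-- def calculate_button_positions(num_elements, button_width, button_height, spacing, max_per_line, screen_width, start_y):
--     positions = []
--     for i in range(num_elements):
--         line_index = i // max_per_line
--         position_in_line = i % max_per_line
--
--         # Calcul du nombre de boutons dans la ligne actuelle
--         if (line_index + 1) * max_per_line > num_elements:
--             buttons_in_line = num_elements % max_per_line or max_per_line
--         else:
--             buttons_in_line = max_per_line
--
--         # Calcul de la largeur totale des boutons dans cette ligne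
--         total_width_of_buttons = buttons_in_line * button_width + (buttons_in_line - 1) * spacing
--
--         # Calcul du décalage pour centrer les boutons
--         x_start = (screen_width - total_width_of_buttons) // 2
--
--         # Position calculée pour chaque bouton
--         x = x_start + position_in_line * (button_width + spacing)
--         y = start_y + line_index * (button_height + spacing)
--
--         positions.append((x, y))
--     return positions
-- ===== SOURCE B (Python) =====
-- def calculate_button_positions(num_elements, button_width, button_height, spacing, max_per_line, screen_width, start_y):
--     positions = []
--     if num_elements <= 0:
--         return positions
--     num_rows = -(-num_elements // max_per_line)  # ceil division
--     step = button_width + spacing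
--     for row in range(num_rows):
--         buttons_in_line = min(max_per_line, num_elements - row * max_per_line)
--         total_width = buttons_in_line * button_width + (buttons_in_line - 1) * spacing
--         x_start = (screen_width - total_width) // 2
--         y = start_y + row * (button_height + spacing)
--         for j in range(buttons_in_line):
--             positions.append((x_start + j * step, y))
--     return positions
-- ===== Notes on version B (the rewrite author's own statement) =====
-- stated objective: simpler
-- what changed: Replaces the flat loop over button indices with //-%-per-row arithmetic by a nested loop over rows then buttons, computing the row's button count, centered x_start and y once per row; Pre_ excludes non-positive max_per_line with positive num_elements, where A either divides by zero or emits a meaningless negative-row layout that is an artefact of the flat //-% arithmetic.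
-- outside the precondition, e.g. on calculate_button_positions(3, 10, 10, 2, -2, 100, 0): A returns [(63, 0), (51, -12), (63, -12)], B returns []
import Mathlib
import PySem

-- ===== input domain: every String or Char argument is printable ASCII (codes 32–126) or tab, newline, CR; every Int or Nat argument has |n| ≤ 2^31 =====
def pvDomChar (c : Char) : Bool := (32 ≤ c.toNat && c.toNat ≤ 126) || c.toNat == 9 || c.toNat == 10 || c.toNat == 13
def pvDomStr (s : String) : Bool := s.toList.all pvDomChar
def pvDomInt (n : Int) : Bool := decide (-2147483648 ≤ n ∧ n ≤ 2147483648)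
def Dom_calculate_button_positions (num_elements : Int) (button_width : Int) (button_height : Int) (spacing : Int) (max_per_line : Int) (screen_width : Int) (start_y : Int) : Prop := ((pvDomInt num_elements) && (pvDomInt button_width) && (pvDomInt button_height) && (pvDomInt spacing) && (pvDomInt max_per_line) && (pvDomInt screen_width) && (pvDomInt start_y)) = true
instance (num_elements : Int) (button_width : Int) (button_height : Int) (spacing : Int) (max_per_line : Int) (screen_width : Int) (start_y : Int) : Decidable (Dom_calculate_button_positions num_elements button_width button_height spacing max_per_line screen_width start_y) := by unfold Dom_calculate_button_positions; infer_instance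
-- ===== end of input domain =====

-- B: nested row/column loops with per-row button count and centering, instead of A's flat
-- loop with per-button //-% arithmetic; objective: simpler. Equal return values on Pre_.


-- ===== PORT A =====
def calculate_button_positions (num_elements : Int) (button_width : Int) (button_height : Int) (spacing : Int) (max_per_line : Int) (screen_width : Int) (start_y : Int) : List (Int × Int) :=
  (PySem.List.pyRange 0 num_elements 1).foldl (fun positions i =>
    let line_index := PySem.Int.floordiv i max_per_line
    let position_in_line := PySem.Int.mod i max_per_line
    let buttons_in_line :=
      if (line_index + 1) * max_per_line > num_elements then
        (if PySem.Int.mod num_elements max_per_line ≠ 0 then PySem.Int.mod num_elements max_per_line else max_per_line)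
      else max_per_line
    let total_width_of_buttons := buttons_in_line * button_width + (buttons_in_line - 1) * spacing
    let x_start := PySem.Int.floordiv (screen_width - total_width_of_buttons) 2
    let x := x_start + position_in_line * (button_width + spacing)
    let y := start_y + line_index * (button_height + spacing)
    positions ++ [(x, y)]) []

def calculate_button_positions_alt (num_elements : Int) (button_width : Int) (button_height : Int) (spacing : Int) (max_per_line : Int) (screen_width : Int) (start_y : Int) : List (Int × Int) :=
  if num_elements ≤ 0 then []
  else
    let num_rows := -(PySem.Int.floordiv (-num_elements) max_per_line)
    let step := button_width + spacing
    (PySem.List.pyRange 0 num_rows 1).foldl (fun positions row =>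
      let buttons_in_line := min max_per_line (num_elements - row * max_per_line)
      let total_width := buttons_in_line * button_width + (buttons_in_line - 1) * spacing
      let x_start := PySem.Int.floordiv (screen_width - total_width) 2
      let y := start_y + row * (button_height + spacing)
      (PySem.List.pyRange 0 buttons_in_line 1).foldl (fun ps j => ps ++ [(x_start + j * step, y)]) positions) []

-- ===== PRECONDITION & SPEC =====
-- Pre_ excludes inputs with num_elements > 0 and max_per_line ≤ 0: there A divides by zero
-- (max_per_line = 0, ZeroDivisionError — B raises too) or returns a layout with negative row
-- indices, an artefact of the flat //-% arithmetic on a negative divisor (B returns []).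
def Pre_calculate_button_positions (num_elements : Int) (button_width : Int) (button_height : Int) (spacing : Int) (max_per_line : Int) (screen_width : Int) (start_y : Int) : Prop :=
  num_elements ≤ 0 ∨ 1 ≤ max_per_line
instance (num_elements : Int) (button_width : Int) (button_height : Int) (spacing : Int) (max_per_line : Int) (screen_width : Int) (start_y : Int) : Decidable (Pre_calculate_button_positions num_elements button_width button_height spacing max_per_line screen_width start_y) := by unfold Pre_calculate_button_positions; infer_instance

def pvWitness_calculate_button_positions : Int × Int × Int × Int × Int × Int × Int := (5, 10, 10, 2, 3, 100, 7)

def Spec_calculate_button_positions (num_elements : Int) (button_width : Int) (button_height : Int) (spacing : Int) (max_per_line : Int) (screen_width : Int) (start_y : Int) (out : List (Int × Int)) : Prop := out = calculate_button_positions_alt num_elements button_width button_height spacing max_per_line screen_width start_y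
instance (num_elements : Int) (button_width : Int) (button_height : Int) (spacing : Int) (max_per_line : Int) (screen_width : Int) (start_y : Int) (out : List (Int × Int)) : Decidable (Spec_calculate_button_positions num_elements button_width button_height spacing max_per_line screen_width start_y out) := by unfold Spec_calculate_button_positions; infer_instance

-- ===== CLAIM (what is proved, stated in full; the proofs are below) =====
def Claim_equal_calculate_button_positions : Prop := ∀ (num_elements : Int) (button_width : Int) (button_height : Int) (spacing : Int) (max_per_line : Int) (screen_width : Int) (start_y : Int), Dom_calculate_button_positions num_elements button_width button_height spacing max_per_line screen_width start_y → Pre_calculate_button_positions num_elements button_width button_height spacing max_per_line screen_width start_y → Spec_calculate_button_positions num_elements button_width button_height spacing max_per_line screen_width start_y (calculate_button_positions num_elements button_width button_height spacing max_per_line screen_width start_y)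

-- ===== LEMMAS AND PROOFS =====
theorem pv_fdiv_add (m s j : Int) (hm : 0 < m) (hj : 0 ≤ j) (hjm : j < m) :
    PySem.Int.floordiv (s * m + j) m = s := by
  rw [PySem.Int.floordiv_eq_iff_of_pos hm]
  constructor <;> nlinarith

theorem pv_mod_add (m s j : Int) (hm : 0 < m) (hj : 0 ≤ j) (hjm : j < m) :
    PySem.Int.mod (s * m + j) m = j := by
  have h := PySem.Int.floordiv_mul_add_mod (s * m + j) m
  rw [pv_fdiv_add m s j hm hj hjm] at h
  linarith

theorem pv_buttons (m n s : Int) (hm : 0 < m) (hsn : s * m < n) :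
    (if (s + 1) * m > n then
        (if PySem.Int.mod n m ≠ 0 then PySem.Int.mod n m else m)
      else m) = min m (n - s * m) := by
  have hsm : (s + 1) * m = s * m + m := by ring
  rcases le_or_gt ((s + 1) * m) n with h | h
  · rw [if_neg (by omega)]
    omega
  · have hf : PySem.Int.floordiv n m = s := by
      rw [PySem.Int.floordiv_eq_iff_of_pos hm]; omega
    have hmod : PySem.Int.mod n m = n - s * m := by
      have h2 := PySem.Int.floordiv_mul_add_mod n m
      rw [hf] at h2; linarith
    rw [if_pos (by omega), if_pos (by omega), hmod]
    omega

theorem pv_shift (a k : Int) :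
    PySem.List.pyRange a (a + k) 1 = (PySem.List.pyRange 0 k 1).map (fun j => a + j) := by
  rw [PySem.List.pyRange_one, PySem.List.pyRange_one]
  simp [List.map_map, Function.comp]

theorem pv_chunk (m n rows : Int) (hm : 0 < m) (hlow : (rows - 1) * m < n) (hrows : n ≤ rows * m) :
    ∀ (r : Int), 0 ≤ r → r ≤ rows →
      PySem.List.pyRange (r * m) n 1 =
        (PySem.List.pyRange r rows 1).flatMap
          (fun s => PySem.List.pyRange (s * m) (min ((s + 1) * m) n) 1) := by
  suffices h : ∀ (t : Nat) (r : Int), 0 ≤ r → r ≤ rows → (rows - r).toNat = t →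
      PySem.List.pyRange (r * m) n 1 =
        (PySem.List.pyRange r rows 1).flatMap
          (fun s => PySem.List.pyRange (s * m) (min ((s + 1) * m) n) 1) by
    intro r h0 h1; exact h (rows - r).toNat r h0 h1 rfl
  intro t
  induction t with
  | zero =>
    intro r h0 h1 ht
    have hr : r = rows := by omega
    subst hr
    rw [PySem.List.pyRange_one_eq_nil hrows, PySem.List.pyRange_one_eq_nil (le_refl r)]
    simp
  | succ t ih =>
    intro r h0 h1 ht
    have hrlt : r < rows := by omega
    have hrm : r * m ≤ (rows - 1) * m := mul_le_mul_of_nonneg_right (by omega) (le_of_lt hm)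
    have hrn : r * m < n := lt_of_le_of_lt hrm hlow
    have hsplit : PySem.List.pyRange (r * m) n 1 =
        PySem.List.pyRange (r * m) (min ((r + 1) * m) n) 1 ++
        PySem.List.pyRange (min ((r + 1) * m) n) n 1 := by
      apply PySem.List.pyRange_one_append
      · have : r * m ≤ (r + 1) * m := by nlinarith
        omega
      · omega
    have htail : PySem.List.pyRange (min ((r + 1) * m) n) n 1 =
        PySem.List.pyRange ((r + 1) * m) n 1 := by
      rcases le_or_gt ((r + 1) * m) n with h | h
      · rw [min_eq_left h]
      · rw [min_eq_right (le_of_lt h), PySem.List.pyRange_one_eq_nil (le_refl n),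
            PySem.List.pyRange_one_eq_nil (le_of_lt h)]
    rw [hsplit, htail, ih (r + 1) (by omega) (by omega) (by omega),
        PySem.List.pyRange_one_cons hrlt]
    simp

theorem pv_main (n bw bh sp m sw sy : Int) (hpre : n ≤ 0 ∨ 1 ≤ m) :
    calculate_button_positions n bw bh sp m sw sy = calculate_button_positions_alt n bw bh sp m sw sy := by
  by_cases hn : n ≤ 0
  · simp [calculate_button_positions, calculate_button_positions_alt,
          PySem.List.pyRange_one_eq_nil hn, hn]
  · have hn' : 0 < n := by omega
    have hm : 0 < m := by rcases hpre with h | h <;> omega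
    -- ceiling-division brackets for rows
    have hbr := (PySem.Int.neg_floordiv_neg_eq_iff_of_pos (a := n) (b := m)
        (q := -(PySem.Int.floordiv (-n) m)) hm).mp rfl
    set rows := -(PySem.Int.floordiv (-n) m) with hrowsdef
    obtain ⟨hlow, hhigh⟩ := hbr
    have hrows0 : 0 ≤ rows := by nlinarith
    -- A as a map over button indices
    have hA : calculate_button_positions n bw bh sp m sw sy =
        (PySem.List.pyRange 0 n 1).map (fun i =>
          (PySem.Int.floordiv (sw -
              ((if (PySem.Int.floordiv i m + 1) * m > n then
                  (if PySem.Int.mod n m ≠ 0 then PySem.Int.mod n m else m)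
                else m) * bw +
               ((if (PySem.Int.floordiv i m + 1) * m > n then
                  (if PySem.Int.mod n m ≠ 0 then PySem.Int.mod n m else m)
                else m) - 1) * sp)) 2 + PySem.Int.mod i m * (bw + sp),
           sy + PySem.Int.floordiv i m * (bh + sp))) := by
      unfold calculate_button_positions
      rw [PySem.List.foldl_append_singleton_eq_map]
      simp
    -- B as a flatMap over rows
    have hB : calculate_button_positions_alt n bw bh sp m sw sy =
        (PySem.List.pyRange 0 rows 1).flatMap (fun s =>
          (PySem.List.pyRange 0 (min m (n - s * m)) 1).map (fun j =>
            (PySem.Int.floordiv (sw - (min m (n - s * m) * bw + (min m (n - s * m) - 1) * sp)) 2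
               + j * (bw + sp),
             sy + s * (bh + sp)))) := by
      unfold calculate_button_positions_alt
      rw [if_neg hn]
      simp only
      rw [← hrowsdef]
      have hfun : (fun (positions : List (Int × Int)) (row : Int) =>
          List.foldl (fun ps j => ps ++
            [(PySem.Int.floordiv (sw - (min m (n - row * m) * bw + (min m (n - row * m) - 1) * sp)) 2 + j * (bw + sp),
              sy + row * (bh + sp))]) positions (PySem.List.pyRange 0 (min m (n - row * m)) 1))
          = (fun (positions : List (Int × Int)) (row : Int) =>
          positions ++ (PySem.List.pyRange 0 (min m (n - row * m)) 1).map (fun j =>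
            (PySem.Int.floordiv (sw - (min m (n - row * m) * bw + (min m (n - row * m) - 1) * sp)) 2 + j * (bw + sp),
              sy + row * (bh + sp)))) := by
        funext ps r
        rw [PySem.List.foldl_append_singleton_eq_map]
      rw [hfun, PySem.List.foldl_append_eq_flatMap]
      simp
    rw [hA, hB]
    have hc := pv_chunk m n rows hm hlow hhigh 0 (le_refl 0) hrows0
    rw [zero_mul] at hc
    rw [hc, List.map_flatMap]
    apply List.flatMap_congr
    intro s hs
    rw [PySem.List.mem_pyRange_one] at hs
    obtain ⟨hs0, hsr⟩ := hs
    have hsn : s * m < n := by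
      have : s * m ≤ (rows - 1) * m := mul_le_mul_of_nonneg_right (by omega) (le_of_lt hm)
      omega
    have hmin : min ((s + 1) * m) n = s * m + min m (n - s * m) := by
      have : (s + 1) * m = s * m + m := by ring
      omega
    rw [hmin, pv_shift, List.map_map]
    apply List.map_congr_left
    intro j hj
    rw [PySem.List.mem_pyRange_one] at hj
    obtain ⟨hj0, hjk⟩ := hj
    have hjm : j < m := by omega
    simp only [Function.comp]
    rw [pv_fdiv_add m s j hm hj0 hjm, pv_mod_add m s j hm hj0 hjm, pv_buttons m n s hm hsn]

-- ===== VERDICT (by name: the statement is the Claim_ definition above) =====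
theorem calculate_button_positions_spec : Claim_equal_calculate_button_positions := by
  intro n bw bh sp m sw sy _ hpre
  unfold Spec_calculate_button_positions
  exact pv_main n bw bh sp m sw sy hpre
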